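-- pv_equiv track=rewrite | github.com/sanjayramesh2903/market-regime-detector | plots.py | _regime_runs
-- ===== SOURCE A (Python) =====
-- def _regime_runs(dates, states, state_stats):
--     """Compute contiguous regime runs as (start_date, end_date, label) tuples."""
--     runs = []
--     if len(states) == 0:
--         return runs
--     current_state = states[0]
--     start = dates[0]
--     for i in range(1, len(states)):
--         if states[i] != current_state:
--             label = state_stats[current_state]["label"]
--             runs.append((start, dates[i - 1], label))
--             current_state = states[i]
--             start = dates[i]
--     label = state_stats[current_state]["label"]
--     runs.append((start, dates[-1], label))
--     return runs
-- ===== SOURCE B (Python) =====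
-- def _regime_runs(dates, states, state_stats):
--     """Two-pass: collect segment-start indices, derive end indices, then build runs."""
--     n = len(states)
--     if n == 0:
--         return []
--     starts = [0] + [i for i in range(1, n) if states[i] != states[i - 1]]
--     ends = [s - 1 for s in starts[1:]] + [len(dates) - 1]
--     return [(dates[s], dates[e], state_stats[states[s]]["label"])
--             for s, e in zip(starts, ends)]
-- ===== Notes on version B (the rewrite author's own statement) =====
-- stated objective: alternative
-- what changed: Replaces A's single interleaved loop carrying (runs, current_state, start) state by two passes: first collect segment-start indices (where states[i] != states[i-1]), derive the matching end indices, then build each run by indexing.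
import Mathlib
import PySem

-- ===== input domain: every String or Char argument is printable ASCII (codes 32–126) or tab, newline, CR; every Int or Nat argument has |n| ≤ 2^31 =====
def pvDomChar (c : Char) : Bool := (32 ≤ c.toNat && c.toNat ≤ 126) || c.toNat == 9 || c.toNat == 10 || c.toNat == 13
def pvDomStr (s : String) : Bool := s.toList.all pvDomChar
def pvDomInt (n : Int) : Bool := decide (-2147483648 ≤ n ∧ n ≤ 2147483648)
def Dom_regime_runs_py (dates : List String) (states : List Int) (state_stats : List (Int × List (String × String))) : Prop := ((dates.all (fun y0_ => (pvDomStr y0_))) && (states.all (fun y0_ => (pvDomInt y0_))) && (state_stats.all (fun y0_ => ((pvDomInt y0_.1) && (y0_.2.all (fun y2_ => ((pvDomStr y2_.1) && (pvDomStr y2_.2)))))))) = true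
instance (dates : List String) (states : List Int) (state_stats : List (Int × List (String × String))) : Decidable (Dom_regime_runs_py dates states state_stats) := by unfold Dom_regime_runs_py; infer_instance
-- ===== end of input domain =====

-- B replaces A's single interleaved loop by two passes (segment-start indices first, then run
-- construction); same cost, different decomposition ('alternative').

-- ===== PORT A =====
-- shared helper: state_stats[s]["label"] (dict lookups; default unreachable under Pre_)
def pvLabel (stats : List (Int × List (String × String))) (s : Int) : String :=
  (((PySem.Dict.mk stats).get? s).bind (fun d => (PySem.Dict.mk d).get? "label")).getD ""

-- A's loop body: state is (runs, current_state, start)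
def pvStepA (dates : List String) (states : List Int) (stats : List (Int × List (String × String)))
    (acc : List (String × String × String) × Int × String) (i : Int) :
    List (String × String × String) × Int × String :=
  if (PySem.List.pyGet? states i).getD 0 ≠ acc.2.1 then
    (acc.1 ++ [(acc.2.2, (PySem.List.pyGet? dates (i - 1)).getD "", pvLabel stats acc.2.1)],
     (PySem.List.pyGet? states i).getD 0, (PySem.List.pyGet? dates i).getD "")
  else acc

def regime_runs_py (dates : List String) (states : List Int) (state_stats : List (Int × List (String × String))) : List (String × String × String) :=
  if states.length = 0 then []
  else
    let init : List (String × String × String) × Int × String :=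
      ([], (PySem.List.pyGet? states 0).getD 0, (PySem.List.pyGet? dates 0).getD "")
    let fin := (PySem.List.pyRange 1 (states.length : Int) 1).foldl (pvStepA dates states state_stats) init
    fin.1 ++ [(fin.2.2, (PySem.List.pyGet? dates (-1)).getD "", pvLabel state_stats fin.2.1)]

-- ===== PORT B =====
def regime_runs_py_alt (dates : List String) (states : List Int) (state_stats : List (Int × List (String × String))) : List (String × String × String) :=
  let n : Int := states.length
  if n = 0 then []
  else
    let starts : List Int :=
      0 :: (PySem.List.pyRange 1 n 1).filter
        (fun i => (PySem.List.pyGet? states i).getD 0 ≠ (PySem.List.pyGet? states (i - 1)).getD 0)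
    let ends : List Int := (starts.drop 1).map (fun s => s - 1) ++ [(dates.length : Int) - 1]
    (starts.zip ends).map (fun se =>
      ((PySem.List.pyGet? dates se.1).getD "", (PySem.List.pyGet? dates se.2).getD "",
       pvLabel state_stats ((PySem.List.pyGet? states se.1).getD 0)))

-- ===== PRECONDITION & SPEC =====
-- Pre_ excludes exactly the inputs where the Python A raises: with states nonempty, an empty
-- dates list (IndexError on dates[0]/dates[-1]), a boundary index i reaching past dates
-- (IndexError on dates[i-1]/dates[i]), or a state whose label lookup fails (KeyError).
def Pre_regime_runs_py (dates : List String) (states : List Int) (state_stats : List (Int × List (String × String))) : Prop :=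
  states = [] ∨
    (dates ≠ [] ∧
     (∀ i ∈ PySem.List.pyRange 1 (states.length : Int) 1,
        (PySem.List.pyGet? states i).getD 0 ≠ (PySem.List.pyGet? states (i - 1)).getD 0 →
          i < (dates.length : Int)) ∧
     (∀ s ∈ states, (((PySem.Dict.mk state_stats).get? s).bind (fun d => (PySem.Dict.mk d).get? "label")).isSome))
instance (dates : List String) (states : List Int) (state_stats : List (Int × List (String × String))) : Decidable (Pre_regime_runs_py dates states state_stats) := by unfold Pre_regime_runs_py; infer_instance

def pvWitness_regime_runs_py : List String × List Int × (List (Int × List (String × String))) :=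
  (["d0", "d1", "d2"], [5, 5, 7], [(5, [("label", "calm")]), (7, [("label", "vol")])])

def Spec_regime_runs_py (dates : List String) (states : List Int) (state_stats : List (Int × List (String × String))) (out : List (String × String × String)) : Prop := out = regime_runs_py_alt dates states state_stats
instance (dates : List String) (states : List Int) (state_stats : List (Int × List (String × String))) (out : List (String × String × String)) : Decidable (Spec_regime_runs_py dates states state_stats out) := by unfold Spec_regime_runs_py; infer_instance

-- ===== CLAIM (what is proved, stated in full; the proofs are below) =====
def Claim_equal_regime_runs_py : Prop := ∀ (dates : List String) (states : List Int) (state_stats : List (Int × List (String × String))), Dom_regime_runs_py dates states state_stats → Pre_regime_runs_py dates states state_stats → Spec_regime_runs_py dates states state_stats (regime_runs_py dates states state_stats)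

-- ===== LEMMAS AND PROOFS =====

-- Nat-index version of A's loop body (proof-side only)
def pvStepN (dates : List String) (states : List Int) (stats : List (Int × List (String × String)))
    (acc : List (String × String × String) × Int × String) (i : Nat) :
    List (String × String × String) × Int × String :=
  if states.getD i 0 ≠ acc.2.1 then
    (acc.1 ++ [(acc.2.2, dates.getD (i - 1) "", pvLabel stats acc.2.1)],
     states.getD i 0, dates.getD i "")
  else acc

-- common shape: runs determined by the list of boundary indices
def pvAux (dates : List String) (states : List Int) (stats : List (Int × List (String × String))) :
    String → Int → List Nat → List (String × String × String)
  | start, cur, [] => [(start, (PySem.List.pyGet? dates (-1)).getD "", pvLabel stats cur)]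
  | start, cur, i :: ks =>
      (start, dates.getD (i - 1) "", pvLabel stats cur) ::
        pvAux dates states stats (dates.getD i "") (states.getD i 0) ks

theorem pvStepA_cast (dates : List String) (states : List Int) (stats : List (Int × List (String × String)))
    (acc : List (String × String × String) × Int × String) (i : Nat) (hi : 1 ≤ i) :
    pvStepA dates states stats acc (i : Int) = pvStepN dates states stats acc i := by
  have h2 : ((i : Int) - 1) = ((i - 1 : Nat) : Int) := by omega
  simp only [pvStepA, pvStepN, h2, PySem.List.pyGet?_natCast, List.getD_eq_getElem?_getD]

theorem pvFoldl_congr {α β : Type} (l : List β) (f g : α → β → α) (init : α)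
    (h : ∀ a b, b ∈ l → f a b = g a b) : l.foldl f init = l.foldl g init := by
  induction l generalizing init with
  | nil => rfl
  | cons x l ih =>
    simp only [List.foldl_cons]
    rw [h init x (by simp)]
    exact ih _ (fun a b hb => h a b (by simp [hb]))

theorem pvFoldl_prefix (dates : List String) (states : List Int) (stats : List (Int × List (String × String)))
    (l : List Nat) (rs : List (String × String × String)) (cur : Int) (start : String) :
    List.foldl (pvStepN dates states stats) (rs, cur, start) l =
      (rs ++ (List.foldl (pvStepN dates states stats) ([], cur, start) l).1,
       (List.foldl (pvStepN dates states stats) ([], cur, start) l).2) := by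
  induction l generalizing rs cur start with
  | nil => simp
  | cons a l ih =>
    simp only [List.foldl_cons]
    by_cases h : states.getD a 0 ≠ cur
    · simp only [pvStepN, if_pos h, List.nil_append]
      rw [ih, ih [(start, dates.getD (a - 1) "", pvLabel stats cur)]]
      simp
    · simp only [pvStepN, if_neg h]
      exact ih rs cur start

theorem pvMainA (dates : List String) (states : List Int) (stats : List (Int × List (String × String)))
    (c : Nat) : ∀ (j : Nat) (cur : Int) (start : String), cur = states.getD j 0 →
    (let f := List.foldl (pvStepN dates states stats) ([], cur, start) (List.range' (j + 1) c)
     f.1 ++ [(f.2.2, (PySem.List.pyGet? dates (-1)).getD "", pvLabel stats f.2.1)]) =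
    pvAux dates states stats start cur
      ((List.range' (j + 1) c).filter (fun i => decide (states.getD i 0 ≠ states.getD (i - 1) 0))) := by
  induction c with
  | zero => intro j cur start hcur; simp [pvAux]
  | succ c ih =>
    intro j cur start hcur
    rw [List.range'_succ]
    by_cases h : states.getD (j + 1) 0 = cur
    · have hfilt : decide (states.getD (j + 1) 0 ≠ states.getD (j + 1 - 1) 0) = false := by
        rw [Nat.add_sub_cancel, h, hcur]; simp
      simp only [List.filter_cons, hfilt, Bool.false_eq_true, if_false, List.foldl_cons]
      have h' : states[j + 1]?.getD 0 = cur := by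
        simpa [List.getD_eq_getElem?_getD] using h
      have hstep : pvStepN dates states stats ([], cur, start) (j + 1) = ([], cur, start) := by
        simp [pvStepN, h']
      rw [hstep]
      exact ih (j + 1) cur start h.symm
    · have hfilt : decide (states.getD (j + 1) 0 ≠ states.getD (j + 1 - 1) 0) = true := by
        rw [Nat.add_sub_cancel, ← hcur]; simpa using h
      simp only [List.filter_cons, hfilt, if_true, List.foldl_cons]
      have h' : ¬ states[j + 1]?.getD 0 = cur := by
        simpa [List.getD_eq_getElem?_getD] using h
      have hstep : pvStepN dates states stats ([], cur, start) (j + 1) =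
          ([(start, dates.getD j "", pvLabel stats cur)], states.getD (j + 1) 0, dates.getD (j + 1) "") := by
        simp [pvStepN, h']
      rw [hstep, pvFoldl_prefix]
      simp only [pvAux, Nat.add_sub_cancel]
      rw [← ih (j + 1) (states.getD (j + 1) 0) (dates.getD (j + 1) "") rfl]
      simp

theorem pvZipB (dates : List String) (states : List Int) (stats : List (Int × List (String × String)))
    (ks : List Nat) : ∀ (s : Nat), (∀ k ∈ ks, 1 ≤ k) →
    ((((s : Int) :: ks.map (fun (k : Nat) => (k : Int))).zip
        ((ks.map (fun (k : Nat) => (k : Int))).map (fun x => x - 1) ++ [(dates.length : Int) - 1])).map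
      (fun se => ((PySem.List.pyGet? dates se.1).getD "", (PySem.List.pyGet? dates se.2).getD "",
        pvLabel stats ((PySem.List.pyGet? states se.1).getD 0)))) =
    pvAux dates states stats (dates.getD s "") (states.getD s 0) ks := by
  induction ks with
  | nil =>
    intro s _
    have hlast : (PySem.List.pyGet? dates ((dates.length : Int) - 1)).getD "" =
        (PySem.List.pyGet? dates (-1)).getD "" := by
      cases dates with
      | nil => simp
      | cons d ds =>
        have h1 : ((List.length (d :: ds) : Int) - 1) = (((d :: ds).length - 1 : Nat) : Int) := by
          simp only [List.length_cons]; push_cast; omega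
        rw [h1, PySem.List.pyGet?_natCast, PySem.List.pyGet?_neg_one,
          List.getLast?_eq_getElem?]
    simp only [List.map_nil, List.nil_append, List.zip_cons_cons, List.zip_nil_right,
      List.map_cons, List.map_nil, pvAux, hlast, PySem.List.pyGet?_natCast,
      List.getD_eq_getElem?_getD]
  | cons k ks ih =>
    intro s hge
    have hk : 1 ≤ k := hge k (by simp)
    have hk1 : ((k : Int) - 1) = ((k - 1 : Nat) : Int) := by omega
    simp only [List.map_cons, List.zip_cons_cons, List.cons_append]
    rw [hk1]
    simp only [pvAux]
    rw [ih k (fun x hx => hge x (by simp [hx]))]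
    simp [List.getD_eq_getElem?_getD]

theorem pvRangeCast (n : Int) (m : Nat) (hm : (n - 1).toNat = m) :
    PySem.List.pyRange 1 n 1 = (List.range' 1 m).map (fun (k : Nat) => (k : Int)) := by
  rw [PySem.List.pyRange_one, hm, List.range'_eq_map_range, List.map_map]
  apply List.map_congr_left
  intro k _
  simp [Function.comp]

theorem pvRangeFilterMap (p : Int → Bool) (q : Nat → Bool) (a m : Nat)
    (h : ∀ k ∈ List.range' a m, p (k : Int) = q k) :
    ((List.range' a m).map (fun (k : Nat) => (k : Int))).filter p =
      ((List.range' a m).filter q).map (fun (k : Nat) => (k : Int)) := by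
  induction m generalizing a with
  | zero => rfl
  | succ m ih =>
    rw [List.range'_succ] at *
    simp only [List.map_cons, List.filter_cons, h a (by simp)]
    by_cases hq : q a = true
    · simp only [hq, if_true, List.map_cons]
      rw [ih (a + 1) (fun k hk => h k (by simp [hk]))]
    · simp only [Bool.not_eq_true] at hq
      simp only [hq, Bool.false_eq_true, if_false]
      exact ih (a + 1) (fun k hk => h k (by simp [hk]))

theorem regime_runs_eq (dates : List String) (states : List Int) (stats : List (Int × List (String × String))) :
    regime_runs_py dates states stats = regime_runs_py_alt dates states stats := by
  unfold regime_runs_py regime_runs_py_alt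
  by_cases hn : states.length = 0
  · simp [hn]
  · have hn' : ¬ ((states.length : Int) = 0) := by exact_mod_cast hn
    simp only [hn, hn', if_false]
    set m := states.length - 1 with hmdef
    have hm : ((states.length : Int) - 1).toNat = m := by omega
    rw [pvRangeCast (states.length : Int) m hm]
    -- A side
    have hinit1 : (PySem.List.pyGet? states 0).getD 0 = states.getD 0 0 := by
      rw [PySem.List.pyGet?_zero, List.getD_eq_getElem?_getD]
    have hinit2 : (PySem.List.pyGet? dates 0).getD "" = dates.getD 0 "" := by
      rw [PySem.List.pyGet?_zero, List.getD_eq_getElem?_getD]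
    rw [List.foldl_map, hinit1, hinit2]
    rw [pvFoldl_congr (List.range' 1 m) _ (pvStepN dates states stats) _
      (fun a b hb => pvStepA_cast dates states stats a b (by
        have := List.mem_range'_1.mp hb; omega))]
    have hA := pvMainA dates states stats m 0 (states.getD 0 0) (dates.getD 0 "") rfl
    simp only [Nat.zero_add] at hA
    rw [hA]
    -- B side
    rw [pvRangeFilterMap _ (fun i => decide (states.getD i 0 ≠ states.getD (i - 1) 0)) 1 m
      (by
        intro k hk
        have hk1 : 1 ≤ k := (List.mem_range'_1.mp hk).1
        have h2 : ((k : Int) - 1) = ((k - 1 : Nat) : Int) := by omega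
        simp only [h2, PySem.List.pyGet?_natCast, List.getD_eq_getElem?_getD])]
    simp only [List.drop_succ_cons, List.drop_zero]
    have hB := pvZipB dates states stats
      ((List.range' 1 m).filter (fun i => decide (states.getD i 0 ≠ states.getD (i - 1) 0))) 0
      (by intro k hk
          have := List.mem_range'_1.mp (List.mem_of_mem_filter hk)
          omega)
    simp only [Nat.cast_zero] at hB
    rw [hB]

-- ===== VERDICT (by name: the statement is the Claim_ definition above) =====
theorem regime_runs_py_spec : Claim_equal_regime_runs_py := by
  intro dates states state_stats _ _
  unfold Spec_regime_runs_py
  exact regime_runs_eq dates states state_stats
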